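-- pv_equiv track=rewrite | github.com/geasyheart/srl-parser | src/transform.py | group_pa_by_p_
-- ===== SOURCE A (Python) =====
-- def group_pa_by_p_(srl):
--     grouped_srl = {}
--     for p, b, e, l in srl:
--         bel = grouped_srl.get(p, None)
--         if not bel:
--             bel = grouped_srl[p] = set()
--         bel.add((b, e, l))
--     return dict(sorted(grouped_srl.items(), key=lambda x: x[0]))
-- ===== SOURCE B (Python) =====
-- def group_pa_by_p_(srl):
--     preds = sorted({t[0] for t in srl})
--     return {p: {(b, e, l) for q, b, e, l in srl if q == p} for p in preds}
-- ===== Notes on version B (the rewrite author's own statement) =====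
-- stated objective: simpler
-- what changed: Instead of one pass maintaining a dict of mutable sets and sorting its items at the end, B first collects and sorts the distinct predicates, then builds the result with a dict comprehension that gathers each predicate's (b,e,l) set by a filter pass over the input.
import Mathlib
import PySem

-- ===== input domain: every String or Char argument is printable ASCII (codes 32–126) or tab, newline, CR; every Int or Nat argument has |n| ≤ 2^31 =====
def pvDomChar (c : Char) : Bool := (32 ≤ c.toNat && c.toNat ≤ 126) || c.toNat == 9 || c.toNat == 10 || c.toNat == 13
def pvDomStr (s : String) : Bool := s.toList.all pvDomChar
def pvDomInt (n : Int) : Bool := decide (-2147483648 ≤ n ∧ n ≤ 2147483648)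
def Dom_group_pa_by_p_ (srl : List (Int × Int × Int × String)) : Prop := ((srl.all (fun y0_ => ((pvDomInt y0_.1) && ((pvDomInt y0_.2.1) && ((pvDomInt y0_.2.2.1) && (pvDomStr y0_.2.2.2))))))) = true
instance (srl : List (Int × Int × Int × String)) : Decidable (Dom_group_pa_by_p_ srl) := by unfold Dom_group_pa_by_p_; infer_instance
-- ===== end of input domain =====

-- B replaces A's single pass over a dict of mutable sets (sorted at the end) by: sort the
-- distinct predicates first, then one filter pass per predicate building its set (simpler, not faster).

-- ===== PORT A =====
-- loop body: bel = grouped_srl.get(p, None); if not bel: bel = grouped_srl[p] = set(); bel.add((b, e, l))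
-- (in-place mutation of the set = Dict.insert, which overwrites keeping the key's position)
def pvStepA (d : PySem.Dict Int (PySem.Set (Int × Int × String)))
    (t : Int × Int × Int × String) : PySem.Dict Int (PySem.Set (Int × Int × String)) :=
  let bel : PySem.Set (Int × Int × String) :=
    match PySem.Dict.get? d t.1 with
    | none => PySem.Set.empty
    | some s => if s = [] then PySem.Set.empty else s   -- 'if not bel' is also true for an empty set
  PySem.Dict.insert d t.1 (PySem.Set.add bel (t.2.1, t.2.2.1, t.2.2.2))

def group_pa_by_p_ (srl : List (Int × Int × Int × String)) : List (Int × List (Int × Int × String)) :=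
  -- dict(sorted(grouped_srl.items(), key=lambda x: x[0])): keys are unique, so the dict is that sorted item list
  PySem.List.sorted (srl.foldl pvStepA (PySem.Dict.mk [])).items (fun x => x.1) false

-- ===== PORT B =====
def group_pa_by_p__alt (srl : List (Int × Int × Int × String)) : List (Int × List (Int × Int × String)) :=
  -- preds = sorted({t[0] for t in srl}); each value is the set comprehension over srl filtered to q == p
  (PySem.List.sorted (PySem.Set.ofList (srl.map (fun t => t.1))) (fun x => x) false).map (fun p =>
    (p, (srl.filter (fun t => t.1 == p)).foldl
          (fun s t => PySem.Set.add s (t.2.1, t.2.2.1, t.2.2.2)) PySem.Set.empty))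

-- ===== PRECONDITION & SPEC =====
def Spec_group_pa_by_p_ (srl : List (Int × Int × Int × String)) (out : List (Int × List (Int × Int × String))) : Prop := out = group_pa_by_p__alt srl
instance (srl : List (Int × Int × Int × String)) (out : List (Int × List (Int × Int × String))) : Decidable (Spec_group_pa_by_p_ srl out) := by unfold Spec_group_pa_by_p_; infer_instance

-- ===== CLAIM (what is proved, stated in full; the proofs are below) =====
def Claim_equal_group_pa_by_p_ : Prop := ∀ (srl : List (Int × Int × Int × String)), Dom_group_pa_by_p_ srl → Spec_group_pa_by_p_ srl (group_pa_by_p_ srl)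

-- ===== LEMMAS AND PROOFS =====

-- the set A's loop accumulates for predicate p = the set B's comprehension builds for p
def pvSetOf (p : Int) (l : List (Int × Int × Int × String)) : PySem.Set (Int × Int × String) :=
  (l.filter (fun t => t.1 == p)).foldl
    (fun s t => PySem.Set.add s (t.2.1, t.2.2.1, t.2.2.2)) PySem.Set.empty

theorem pvSetOf_append (q : Int) (l : List (Int × Int × Int × String)) (t : Int × Int × Int × String) :
    pvSetOf q (l ++ [t]) =
      if t.1 = q then PySem.Set.add (pvSetOf q l) (t.2.1, t.2.2.1, t.2.2.2) else pvSetOf q l := by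
  simp only [pvSetOf, List.filter_append, List.filter_cons, List.filter_nil]
  by_cases h : t.1 = q
  · simp [h, List.foldl_append]
  · simp [h]

theorem pvSetOf_not_mem (q : Int) (l : List (Int × Int × Int × String))
    (h : q ∉ l.map (fun t => t.1)) : pvSetOf q l = PySem.Set.empty := by
  have : l.filter (fun t => t.1 == q) = [] := by
    rw [List.filter_eq_nil_iff]
    intro t ht
    simpa using fun hq => h (List.mem_map.mpr ⟨t, ht, hq⟩)
  simp [pvSetOf, this]

theorem pv_get?_map (K : List Int) (f : Int → PySem.Set (Int × Int × String)) (q : Int) :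
    (PySem.Dict.mk (K.map (fun p => (p, f p)))).get? q
      = if q ∈ K then some (f q) else none := by
  induction K with
  | nil => simp [PySem.Dict.get?]
  | cons a K ih =>
      rw [List.map_cons, PySem.Dict.get?_mk_cons]
      by_cases h : a = q
      · subst h; simp
      · have h' : ¬ q = a := fun e => h e.symm
        simp [ih, h, h']

theorem pv_contains_map (K : List Int) (f : Int → PySem.Set (Int × Int × String)) (q : Int) :
    (PySem.Dict.mk (K.map (fun p => (p, f p)))).contains q = decide (q ∈ K) := by
  simp only [PySem.Dict.contains, List.any_map, Function.comp_def]
  induction K with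
  | nil => simp
  | cons a K ih =>
      by_cases h : a = q
      · simp [h]
      · have h' : ¬ q = a := fun e => h e.symm
        simp [h, h', ih]

theorem pv_fold_items (l : List (Int × Int × Int × String)) :
    (l.foldl pvStepA (PySem.Dict.mk [])).items
      = (PySem.Set.ofList (l.map (fun t => t.1))).map (fun p => (p, pvSetOf p l)) := by
  induction l using List.reverseRecOn with
  | nil => rfl
  | append_singleton l t ih =>
      rw [List.foldl_append, PySem.Dict.ext ih]
      have hof : ∀ (xs : List Int) (x : Int),
          PySem.Set.ofList (xs ++ [x]) = PySem.Set.add (PySem.Set.ofList xs) x := by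
        intro xs x; simp [PySem.Set.ofList, List.foldl_append]
      simp only [List.foldl_cons, List.foldl_nil, List.map_append, List.map_cons, List.map_nil, hof]
      by_cases hmem : t.1 ∈ PySem.Set.ofList (l.map (fun t => t.1))
      · -- predicate already present: the dict overwrites in place, the key set is unchanged
        have hK : (PySem.Set.ofList (l.map (fun t => t.1))).contains t.1 = true :=
          List.elem_eq_true_of_mem hmem
        have hbel : (if pvSetOf t.1 l = [] then PySem.Set.empty else pvSetOf t.1 l)
            = pvSetOf t.1 l := by
          split
          · simp_all [PySem.Set.empty]
          · rfl
        simp only [pvStepA, pv_get?_map, hmem, if_true, hbel, PySem.Dict.insert,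
          pv_contains_map, List.map_map, PySem.Set.add, hK, if_true]
        apply List.map_congr_left
        intro p _
        by_cases hp : p = t.1
        · subst hp
          by_cases hc : (t.2.1, t.2.2.1, t.2.2.2) ∈ pvSetOf t.1 l <;>
            simp [pvSetOf_append, PySem.Set.add, hc]
        · have hp' : (p == t.1) = false := beq_false_of_ne hp
          have hp'' : ¬ t.1 = p := fun e => hp e.symm
          simp [pvSetOf_append, hp'', hp]
      · -- new predicate: appended at the end of the dict, and at the end of the key set
        have hK : (PySem.Set.ofList (l.map (fun t => t.1))).contains t.1 = false := by
          simpa using hmem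
        have hnotl : t.1 ∉ l.map (fun t => t.1) := by
          simpa [PySem.Set.mem_ofList] using hmem
        simp only [pvStepA, pv_get?_map, hmem, if_false, PySem.Dict.insert,
          pv_contains_map, decide_false, Bool.false_eq_true, if_false,
          PySem.Set.add, hK, List.map_append, List.map_cons, List.map_nil]
        have h1 : List.map (fun p => (p, pvSetOf p l))
              (PySem.Set.ofList (List.map (fun t => t.1) l))
            = List.map (fun p => (p, pvSetOf p (l ++ [t])))
              (PySem.Set.ofList (List.map (fun t => t.1) l)) := by
          apply List.map_congr_left
          intro p hp
          have hp' : ¬ t.1 = p := by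
            intro e; exact hmem (e ▸ hp)
          simp [pvSetOf_append, hp']
        have h2 : pvSetOf t.1 (l ++ [t])
            = PySem.Set.add PySem.Set.empty (t.2.1, t.2.2.1, t.2.2.2) := by
          simp [pvSetOf_append, pvSetOf_not_mem _ _ hnotl]
        rw [h1, h2]
        simp [PySem.Set.add, PySem.Set.empty]

theorem group_pa_by_p__spec_aux (srl : List (Int × Int × Int × String)) :
    group_pa_by_p_ srl = group_pa_by_p__alt srl := by
  unfold group_pa_by_p_ group_pa_by_p__alt
  rw [pv_fold_items]
  exact PySem.List.sorted_eq_of_perm_of_pairwise_lt _ _ _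
    ((PySem.List.sorted_perm _ _ _).map _)
    (List.Pairwise.map _ (fun a b h => h) (PySem.List.sorted_ofList_pairwise_lt _))

-- ===== VERDICT (by name: the statement is the Claim_ definition above) =====
theorem group_pa_by_p__spec : Claim_equal_group_pa_by_p_ := by
  intro srl _
  exact group_pa_by_p__spec_aux srl
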